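-- pv_equiv track=rewrite | github.com/brionydunbar/coding-challenges | CB_wave_sorting.py | WaveSorting
-- ===== SOURCE A (Python) =====
-- def WaveSorting(arr):
--   N = len(arr)
--   arr.sort() # sort ascending
--   left = 0 # first half pointer
--   right = N // 2 # second half pointer
--   # compare corresponding elements from first half with second
--   while left < (N // 2) and right < N:
--     if arr[right] > arr[left]: # check if element in second half greater
--       left += 1 # move to next element in first half
--       right += 1 # as above for second half
--     else:
--       return "false" # if condition fails, wave sorting not possible
--   return "true"
-- ===== SOURCE B (Python) =====
-- def WaveSorting(arr):
--     # Counting re-implementation, no sort needed: a wave arrangement of the sorted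
--     # halves fails exactly when some value v occupies positions i and i+N//2
--     # of the sorted array, i.e. count(v) > N//2 copies with fewer than N//2
--     # elements strictly below v.  (Unlike A, does not mutate arr.)
--     N = len(arr)
--     counts = {}
--     for x in arr:
--         counts[x] = counts.get(x, 0) + 1
--     half = N // 2
--     for v, c in counts.items():
--         if c > half and sum(1 for x in arr if x < v) < half:
--             return "false"
--     return "true"
-- ===== Notes on version B (the rewrite author's own statement) =====
-- stated objective: alternative
-- what changed: replaces sort + paired two-half pointer scan by a single-pass frequency counter: the arrangement fails exactly when some value occurs more than N//2 times while fewer than N//2 elements are strictly below it (note: A sorts arr in place, B does not mutate it).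
import Mathlib
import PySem

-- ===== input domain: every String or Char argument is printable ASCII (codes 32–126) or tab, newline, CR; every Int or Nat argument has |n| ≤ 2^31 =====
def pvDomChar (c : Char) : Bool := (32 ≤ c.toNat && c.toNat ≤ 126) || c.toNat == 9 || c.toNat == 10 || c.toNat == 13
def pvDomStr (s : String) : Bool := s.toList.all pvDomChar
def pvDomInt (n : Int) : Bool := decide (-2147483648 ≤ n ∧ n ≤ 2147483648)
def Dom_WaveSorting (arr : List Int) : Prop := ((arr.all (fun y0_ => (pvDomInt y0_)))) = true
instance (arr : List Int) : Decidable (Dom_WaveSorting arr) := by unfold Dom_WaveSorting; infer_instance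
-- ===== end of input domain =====

-- B replaces A's sort + two-half pointer scan by a one-pass frequency count (a different algorithm);
-- equivalence is about the RETURN value only: A sorts its argument in place, B does not mutate it.

-- ===== PORT A =====
-- the while loop of A; both pyGet? indices are in range on every call A makes,
-- the `none` branches are unreachable there
def waveLoop (s : List Int) (N left right : Int) : String :=
  if _hg : left < PySem.Int.floordiv N 2 ∧ right < N then
    match PySem.List.pyGet? s right, PySem.List.pyGet? s left with
    | some r, some l => if r > l then waveLoop s N (left + 1) (right + 1) else "false"
    | _, _ => "false"
  else "true"
termination_by (N - right).toNat
decreasing_by omega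

def WaveSorting (arr : List Int) : String :=
  let N : Int := (arr.length : Int)
  let s := PySem.List.sorted arr (fun x => x) false
  waveLoop s N 0 (PySem.Int.floordiv N 2)

-- ===== PORT B =====
def WaveSorting_alt (arr : List Int) : String :=
  let N : Int := (arr.length : Int)
  let counts := arr.foldl (fun d x => d.insert x (d.getD x 0 + 1)) (PySem.Dict.empty : PySem.Dict Int Int)
  let half := PySem.Int.floordiv N 2
  if counts.items.any (fun p =>
      decide (half < p.2) &&
      decide ((arr.map (fun x => if x < p.1 then (1 : Int) else 0)).sum < half))
  then "false" else "true"

-- ===== PRECONDITION & SPEC =====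
def Spec_WaveSorting (arr : List Int) (out : String) : Prop := out = WaveSorting_alt arr
instance (arr : List Int) (out : String) : Decidable (Spec_WaveSorting arr out) := by unfold Spec_WaveSorting; infer_instance

-- ===== CLAIM (what is proved, stated in full; the proofs are below) =====
def Claim_equal_WaveSorting : Prop := ∀ (arr : List Int), Dom_WaveSorting arr → Spec_WaveSorting arr (WaveSorting arr)

-- ===== LEMMAS AND PROOFS =====

theorem half_cast (n : Nat) : PySem.Int.floordiv (n : Int) 2 = ((n / 2 : Nat) : Int) := by
  exact_mod_cast PySem.Int.floordiv_natCast n 2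

-- A's loop, characterised: starting at the pair (left, left + n/2) it returns "true"
-- iff every remaining pair is strictly increasing
theorem waveLoop_eq (s : List Int) (fuel : Nat) :
    ∀ left : Nat, s.length / 2 - left ≤ fuel →
      waveLoop s (s.length : Int) (left : Int) ((left : Int) + ((s.length / 2 : Nat) : Int)) =
        (if ∀ i : Nat, left ≤ i → i < s.length / 2 → s.getD i 0 < s.getD (i + s.length / 2) 0
         then "true" else "false") := by
  induction fuel with
  | zero =>
    intro left hf
    have hle : s.length / 2 ≤ left := by omega
    rw [waveLoop]
    rw [dif_neg, if_pos]
    · intro i h1 h2; omega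
    · rw [half_cast]; push_cast; omega
  | succ m ih =>
    intro left hf
    by_cases hlt : left < s.length / 2
    · have hlen : left + s.length / 2 < s.length := by omega
      rw [waveLoop]
      rw [dif_pos (by rw [half_cast]; push_cast; omega)]
      have h1 : ((left : Int) + ((s.length / 2 : Nat) : Int)) = ((left + s.length / 2 : Nat) : Int) := by
        push_cast; ring
      rw [h1, PySem.List.pyGet?_natCast, PySem.List.pyGet?_natCast,
        List.getElem?_eq_getElem hlen, List.getElem?_eq_getElem (by omega : left < s.length)]
      simp only
      have h2 : ((left : Int) + 1) = ((left + 1 : Nat) : Int) := by push_cast; ring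
      have h3 : ((left + s.length / 2 : Nat) : Int) + 1 = ((left + 1 : Int)) + ((s.length / 2 : Nat) : Int) := by
        push_cast; ring
      by_cases hcmp : s[left]'(by omega) < s[left + s.length / 2]'hlen
      · rw [if_pos (by exact hcmp), h3, h2, ih (left + 1) (by omega)]
        have hgl : s.getD left 0 = s[left]'(by omega) := List.getD_eq_getElem s 0 (by omega)
        have hgr : s.getD (left + s.length / 2) 0 = s[left + s.length / 2]'hlen :=
          List.getD_eq_getElem s 0 hlen
        by_cases hall : ∀ i : Nat, left + 1 ≤ i → i < s.length / 2 → s.getD i 0 < s.getD (i + s.length / 2) 0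
        · rw [if_pos hall, if_pos]
          intro i hi1 hi2
          rcases Nat.eq_or_lt_of_le hi1 with h | h
          · rw [← h, hgl, hgr]; exact hcmp
          · exact hall i h hi2
        · rw [if_neg hall, if_neg]
          intro hc
          exact hall (fun i hi1 hi2 => hc i (by omega) hi2)
      · rw [if_neg (by exact hcmp), if_neg]
        intro hc
        have := hc left (le_refl _) hlt
        rw [List.getD_eq_getElem s 0 (by omega : left < s.length),
          List.getD_eq_getElem s 0 hlen] at this
        exact hcmp this
    · rw [waveLoop]
      rw [dif_neg, if_pos]
      · intro i h1 h2; omega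
      · rw [half_cast]; push_cast; omega

-- countP of a ≤-downward-closed predicate over a sorted list is an initial segment
theorem sorted_countP_iff (s : List Int) (p : Int → Bool)
    (hp : ∀ x y : Int, x ≤ y → p y = true → p x = true)
    (hs : s.Pairwise (· ≤ ·)) :
    ∀ (k : Nat) (hk : k < s.length), (p (s[k]'hk) = true ↔ k < s.countP p) := by
  induction s with
  | nil => intro k hk; simp at hk
  | cons a t ih =>
    intro k hk
    rcases List.pairwise_cons.mp hs with ⟨ha, ht⟩
    by_cases hpa : p a = true
    · rw [List.countP_cons_of_pos hpa]
      cases k with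
      | zero => simp [hpa]
      | succ j =>
        have hj : j < t.length := by simpa using hk
        simp only [List.getElem_cons_succ]
        rw [ih ht j hj]
        omega
    · have hzero : t.countP p = 0 := by
        rw [List.countP_eq_zero]
        intro y hy hpy
        exact hpa (hp a y (ha y hy) hpy)
      rw [List.countP_cons_of_neg hpa, hzero]
      cases k with
      | zero => simp [hpa]
      | succ j =>
        have hj : j < t.length := by simpa using hk
        simp only [List.getElem_cons_succ]
        constructor
        · intro hpt
          exact absurd hpt (List.countP_eq_zero.mp hzero _ (List.getElem_mem hj))
        · omega

theorem countP_le_split (s : List Int) (v : Int) :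
    s.countP (fun x => decide (x ≤ v)) = s.countP (fun x => decide (x < v)) + s.count v := by
  induction s with
  | nil => simp
  | cons a t ih =>
    rw [List.count_cons]
    rcases lt_trichotomy a v with h | h | h
    · rw [List.countP_cons_of_pos (by simp [le_of_lt h]),
        List.countP_cons_of_pos (by simp [h])]
      simp only [ih]
      have : ¬ (a = v) := ne_of_lt h
      simp [this]; omega
    · subst h
      rw [List.countP_cons_of_pos (by simp),
        List.countP_cons_of_neg (by simp)]
      simp [ih]; omega
    · rw [List.countP_cons_of_neg (by simp; omega),
        List.countP_cons_of_neg (by simp; omega)]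
      have : ¬ (a = v) := ne_of_gt h
      simp [this, ih]

-- positional characterisation: in a sorted list, position k holds v iff k lies in v's block
theorem sorted_getElem_eq_iff (s : List Int) (hs : s.Pairwise (· ≤ ·)) (v : Int)
    (k : Nat) (hk : k < s.length) :
    s[k]'hk = v ↔ (s.countP (fun x => decide (x < v)) ≤ k ∧
                   k < s.countP (fun x => decide (x < v)) + s.count v) := by
  have hlt := sorted_countP_iff s (fun x => decide (x < v))
    (fun x y hxy hy => by simp at hy ⊢; omega) hs k hk
  have hle := sorted_countP_iff s (fun x => decide (x ≤ v))
    (fun x y hxy hy => by simp at hy ⊢; omega) hs k hk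
  rw [countP_le_split] at hle
  simp only [decide_eq_true_eq] at hlt hle
  constructor
  · intro h
    constructor
    · by_contra hc
      push_neg at hc
      have := hlt.mpr hc
      omega
    · exact hle.mp (le_of_eq h)
  · intro ⟨h1, h2⟩
    have hnotlt : ¬ (s[k]'hk < v) := fun hc => by have := hlt.mp hc; omega
    have hlev : s[k]'hk ≤ v := hle.mpr h2
    omega

-- the combinatorial heart: a flat pair in the sorted halves ⟺ a too-frequent value
-- with a short strict-below prefix
theorem main_iff (s : List Int) (hs : s.Pairwise (· ≤ ·)) :
    (∃ i : Nat, i < s.length / 2 ∧ ¬ (s.getD i 0 < s.getD (i + s.length / 2) 0)) ↔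
    (∃ v : Int, s.length / 2 < s.count v ∧
       s.countP (fun x => decide (x < v)) < s.length / 2) := by
  have h2le : 2 * (s.length / 2) ≤ s.length := by omega
  constructor
  · rintro ⟨i, hi, hflat⟩
    have hi2 : i + s.length / 2 < s.length := by omega
    have hi1 : i < s.length := by omega
    rw [List.getD_eq_getElem s 0 hi1, List.getD_eq_getElem s 0 hi2] at hflat
    have hmono : s[i]'hi1 ≤ s[i + s.length / 2]'hi2 :=
      List.pairwise_iff_getElem.mp hs i (i + s.length / 2) hi1 hi2 (by omega)
    have heq : s[i + s.length / 2]'hi2 = s[i]'hi1 := by omega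
    set v := s[i]'hi1 with hv
    have h1 := (sorted_getElem_eq_iff s hs v i hi1).mp rfl
    have h2 := (sorted_getElem_eq_iff s hs v (i + s.length / 2) hi2).mp heq
    exact ⟨v, by omega, by omega⟩
  · rintro ⟨v, hc, hb⟩
    set j := s.countP (fun x => decide (x < v)) with hj
    have htot : j + s.count v ≤ s.length := by
      rw [hj, ← countP_le_split]
      exact List.countP_le_length
    have hj2 : j + s.length / 2 < s.length := by omega
    have hj1 : j < s.length := by omega
    refine ⟨j, hb, ?_⟩
    rw [List.getD_eq_getElem s 0 hj1, List.getD_eq_getElem s 0 hj2]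
    have e1 : s[j]'hj1 = v := (sorted_getElem_eq_iff s hs v j hj1).mpr ⟨le_refl _, by omega⟩
    have e2 : s[j + s.length / 2]'hj2 = v :=
      (sorted_getElem_eq_iff s hs v (j + s.length / 2) hj2).mpr ⟨by omega, by omega⟩
    rw [e1, e2]; omega

-- B, characterised
theorem alt_eq (arr : List Int) :
    WaveSorting_alt arr =
      (if ∃ v ∈ arr, arr.length / 2 < arr.count v ∧
          arr.countP (fun x => decide (x < v)) < arr.length / 2
       then "false" else "true") := by
  unfold WaveSorting_alt
  simp only [PySem.Dict.foldl_insert_getD_add_one_eq_counter, half_cast]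
  by_cases h : ∃ v ∈ arr, arr.length / 2 < arr.count v ∧
      arr.countP (fun x => decide (x < v)) < arr.length / 2
  · rw [if_pos h, if_pos]
    rcases h with ⟨v, hv, hc, hb⟩
    rw [List.any_eq_true]
    refine ⟨(v, (arr.count v : Int)), ?_, ?_⟩
    · rw [PySem.Dict.items_counter]
      exact List.mem_map.mpr ⟨v, (PySem.Set.mem_ofList arr v).mpr hv, rfl⟩
    · have hsum := PySem.List.sum_map_ite_one_zero (fun x : Int => decide (x < v)) arr
      simp only [decide_eq_true_eq] at hsum
      simp only [Bool.and_eq_true, decide_eq_true_eq, hsum]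
      exact ⟨by exact_mod_cast hc, by exact_mod_cast hb⟩
  · rw [if_neg h, if_neg]
    intro hc
    rw [List.any_eq_true] at hc
    rcases hc with ⟨p, hp, hpred⟩
    rw [PySem.Dict.items_counter, List.mem_map] at hp
    rcases hp with ⟨v, hv, rfl⟩
    have hsum := PySem.List.sum_map_ite_one_zero (fun x : Int => decide (x < v)) arr
    simp only [decide_eq_true_eq] at hsum
    simp only [Bool.and_eq_true, decide_eq_true_eq, hsum] at hpred
    exact h ⟨v, (PySem.Set.mem_ofList arr v).mp hv,
      by exact_mod_cast hpred.1, by exact_mod_cast hpred.2⟩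

-- ===== VERDICT (by name: the statement is the Claim_ definition above) =====
theorem WaveSorting_spec : Claim_equal_WaveSorting := by
  intro arr _
  unfold Spec_WaveSorting WaveSorting
  simp only
  set s := PySem.List.sorted arr (fun x => x) false with hsdef
  have hperm : s.Perm arr := PySem.List.sorted_perm arr (fun x => x) false
  have hlen : s.length = arr.length := hperm.length_eq
  have hs : s.Pairwise (· ≤ ·) := PySem.List.sorted_pairwise arr (fun x => x)
  have hcount : ∀ v : Int, arr.count v = s.count v := fun v => (hperm.count_eq v).symm
  have hcountP : ∀ p : Int → Bool, arr.countP p = s.countP p := fun p => (hperm.countP_eq p).symm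
  have hstep : waveLoop s (s.length : Int) ((0 : Nat) : Int)
      (((0 : Nat) : Int) + ((s.length / 2 : Nat) : Int)) =
      (if ∀ i : Nat, 0 ≤ i → i < s.length / 2 → s.getD i 0 < s.getD (i + s.length / 2) 0
       then "true" else "false") := waveLoop_eq s (s.length / 2) 0 (by omega)
  rw [show (((0 : Nat) : Int) + ((s.length / 2 : Nat) : Int)) = ((s.length / 2 : Nat) : Int)
    by ring] at hstep
  rw [alt_eq, ← hlen, half_cast, show (0 : Int) = ((0 : Nat) : Int) from rfl, hstep]
  by_cases hall : ∀ i : Nat, 0 ≤ i → i < s.length / 2 → s.getD i 0 < s.getD (i + s.length / 2) 0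
  · rw [if_pos hall, if_neg]
    rintro ⟨v, _, hc, hb⟩
    rw [hcount] at hc
    rw [hcountP] at hb
    rcases (main_iff s hs).mpr ⟨v, hc, hb⟩ with ⟨i, hi, hflat⟩
    exact hflat (hall i (by omega) hi)
  · rw [if_neg hall, if_pos]
    push_neg at hall
    rcases hall with ⟨i, _, hi, hflat⟩
    rcases (main_iff s hs).mp ⟨i, hi, not_lt.mpr hflat⟩ with ⟨v, hc, hb⟩
    have hv : v ∈ arr := List.count_pos_iff.mp (by rw [hcount]; omega)
    exact ⟨v, hv, by rw [hcount]; exact hc, by rw [hcountP]; exact hb⟩
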